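-- pv_equiv track=rewrite | github.com/NateDevine/AI | Game/constants.py | getPlayerNumber
-- ===== SOURCE A (Python) =====
-- NPLAYERS      =    4
--
-- PLAYERKEY     =  0x0100
--
-- PLAYERMASK    =  0x0f00
--
-- WALL          =  0x1000
--
-- def isPlayer(x):
--    x = x & PLAYERMASK
--    return (x >= PLAYERKEY) and (x < WALL)
--
-- def getPlayerNumber(x):
--    x = x & PLAYERMASK
--    if not isPlayer(x):
--       return -1
--    for i in range(NPLAYERS):
--       if (PLAYERKEY << i) == x:
--          return i
--    return -1
-- ===== SOURCE B (Python) =====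
-- PLAYERMASK    =  0x0f00
--
-- def getPlayerNumber(x):
--    m = x & PLAYERMASK
--    if m and (m & (m - 1)) == 0:
--       return m.bit_length() - 9
--    return -1
-- ===== Notes on version B (the rewrite author's own statement) =====
-- stated objective: simpler
-- what changed: Replaces the isPlayer range check plus the NPLAYERS-iteration bit-scan loop with a direct single-set-bit test ((m & (m-1)) == 0) and the closed-form index m.bit_length() - 9.
import Mathlib
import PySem

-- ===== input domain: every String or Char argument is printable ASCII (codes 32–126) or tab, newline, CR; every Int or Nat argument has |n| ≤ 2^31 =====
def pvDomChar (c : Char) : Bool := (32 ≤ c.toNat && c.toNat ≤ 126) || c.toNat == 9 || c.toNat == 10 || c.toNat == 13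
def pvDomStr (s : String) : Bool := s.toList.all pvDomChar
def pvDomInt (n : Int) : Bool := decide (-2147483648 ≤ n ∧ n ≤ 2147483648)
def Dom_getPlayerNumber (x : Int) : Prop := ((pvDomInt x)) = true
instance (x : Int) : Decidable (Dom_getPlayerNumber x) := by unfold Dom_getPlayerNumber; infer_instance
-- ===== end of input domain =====

-- B replaces A's range check + 4-step bit-scan loop with a single-set-bit test and a bit_length formula (objective: simpler).

-- ===== PORT A =====
-- NPLAYERS = 4, PLAYERKEY = 0x0100 = 256, PLAYERMASK = 0x0f00 = 3840, WALL = 0x1000 = 4096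
def pvIsPlayer (x : Int) : Bool :=
  let x := PySem.Int.band x 3840
  decide (256 ≤ x) && decide (x < 4096)

-- the 'for i in range(NPLAYERS)' loop with its early return
def pvLoopA (x : Int) : List Int → Int
  | [] => -1
  | i :: rest => if (256 : Int) <<< i.toNat = x then i else pvLoopA x rest

def getPlayerNumber (x : Int) : Int :=
  let x := PySem.Int.band x 3840
  if ¬ (pvIsPlayer x = true) then -1
  else pvLoopA x (PySem.List.pyRange 0 4 1)

-- ===== PORT B =====
def getPlayerNumber_alt (x : Int) : Int :=
  let m := PySem.Int.band x 3840
  if m ≠ 0 ∧ PySem.Int.band m (m - 1) = 0 then (PySem.Int.bitLength m : Int) - 9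
  else -1

-- ===== PRECONDITION & SPEC =====
def Spec_getPlayerNumber (x : Int) (out : Int) : Prop := out = getPlayerNumber_alt x
instance (x : Int) (out : Int) : Decidable (Spec_getPlayerNumber x out) := by unfold Spec_getPlayerNumber; infer_instance

-- ===== CLAIM (what is proved, stated in full; the proofs are below) =====
def Claim_equal_getPlayerNumber : Prop := ∀ (x : Int), Dom_getPlayerNumber x → Spec_getPlayerNumber x (getPlayerNumber x)

-- ===== LEMMAS AND PROOFS =====

theorem pvLandIdem (a b : ℕ) : (a &&& b) &&& b = a &&& b := by
  apply Nat.eq_of_testBit_eq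
  intro i
  rw [Nat.testBit_and, Nat.testBit_and, Bool.and_assoc, Bool.and_self]

-- every submask of 3840 is 256 * t with t < 16
theorem pvSubmask (v : ℕ) (hv : v &&& 3840 = v) : ∃ t : ℕ, t < 16 ∧ v = 256 * t := by
  have h255 : v % 256 = 0 := by
    have : v &&& 255 = (v &&& 3840) &&& 255 := by rw [hv]
    rw [Nat.and_assoc, show (3840 &&& 255 : ℕ) = 0 from rfl, Nat.and_zero] at this
    have h := Nat.and_two_pow_sub_one_eq_mod v 8
    norm_num at h
    omega
  have hle : v ≤ 3840 := by
    have := Nat.and_le_right (n := v) (m := 3840)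
    omega
  exact ⟨v / 256, by omega, by omega⟩

theorem pvSub16 : ∀ t : Fin 16, (3840 - 256 * t.val) &&& 3840 = 3840 - 256 * t.val := by decide

-- every masked value is a nonnegative submask of 3840
theorem pvMaskShape (x : Int) : ∃ v : ℕ, v &&& 3840 = v ∧ PySem.Int.band x 3840 = (v : Int) := by
  by_cases hx : 0 ≤ x
  · refine ⟨x.toNat &&& 3840, pvLandIdem _ _, ?_⟩
    simp [PySem.Int.band, hx]
  · refine ⟨3840 - (3840 &&& (-x - 1).toNat), ?_, ?_⟩
    · have hs : ((-x - 1).toNat &&& 3840) &&& 3840 = (-x - 1).toNat &&& 3840 := pvLandIdem _ _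
      obtain ⟨t, ht, hteq⟩ := pvSubmask _ hs
      rw [Nat.land_comm 3840, hteq]
      exact pvSub16 ⟨t, ht⟩
    · simp [PySem.Int.band, hx]

theorem pvAgree16 : ∀ t : Fin 16, getPlayerNumber ((256 * t.val : ℕ) : Int) = getPlayerNumber_alt ((256 * t.val : ℕ) : Int) := by decide

theorem pvBandCast (v : ℕ) : PySem.Int.band (v : Int) 3840 = ((v &&& 3840 : ℕ) : Int) := by
  rw [show (3840 : Int) = ((3840 : ℕ) : Int) by norm_num]
  exact PySem.Int.band_natCast v 3840

theorem getPlayerNumber_spec : Claim_equal_getPlayerNumber := by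
  intro x _
  obtain ⟨v, hv, hb⟩ := pvMaskShape x
  have hcast : PySem.Int.band (v : Int) 3840 = PySem.Int.band x 3840 := by
    rw [pvBandCast, hv, hb]
  have hA : getPlayerNumber x = getPlayerNumber (v : Int) := by
    simp only [getPlayerNumber, hcast]
  have hB : getPlayerNumber_alt x = getPlayerNumber_alt (v : Int) := by
    simp only [getPlayerNumber_alt, hcast]
  obtain ⟨t, ht, rfl⟩ := pvSubmask v hv
  show getPlayerNumber x = getPlayerNumber_alt x
  rw [hA, hB]
  exact pvAgree16 ⟨t, ht⟩
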